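-- pv_equiv track=rewrite | github.com/luxurahair/luxura-inventory-api | wix_seo_push_v2.py | get_color_info
-- ===== SOURCE A (Python) =====
-- from typing import Any, Dict, List, Optional, Tuple
--
-- COLOR_LUXURA_MAP = {
--     # ═══════════ NOIRS ═══════════
--     "1": {"luxe": "Onyx Noir", "sku": "ONYX-NOIR", "type": "SOLID", "category": "noir"},
--     "1B": {"luxe": "Noir Soie", "sku": "NOIR-SOIE", "type": "SOLID", "category": "noir"},
--
--     # ═══════════ BRUNS FONCÉS ═══════════
--     "2": {"luxe": "Espresso Intense", "sku": "ESPRESSO", "type": "SOLID", "category": "brun"},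
--     "DB": {"luxe": "Nuit Mystère", "sku": "NUIT-MYSTERE", "type": "SOLID", "category": "brun"},
--     "DC": {"luxe": "Chocolat Profond", "sku": "CHOCOLAT-PROFOND", "type": "SOLID", "category": "brun"},
--     "CACAO": {"luxe": "Cacao Velours", "sku": "CACAO-VELOURS", "type": "SOLID", "category": "brun"},
--     "CHENGTU": {"luxe": "Soie d'Orient", "sku": "SOIE-ORIENT", "type": "SOLID", "category": "brun"},
--     "FOOCHOW": {"luxe": "Cachemire Oriental", "sku": "CACHEMIRE-ORIENTAL", "type": "SOLID", "category": "brun"},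
--
--     # ═══════════ CHÂTAIGNES ═══════════
--     "3": {"luxe": "Châtaigne Naturelle", "sku": "CHATAIGNE", "type": "SOLID", "category": "chataigne"},
--     "CINNAMON": {"luxe": "Cannelle Épicée", "sku": "CANNELLE", "type": "SOLID", "category": "chataigne"},
--     "3/3T24": {"luxe": "Châtaigne Lumière", "sku": "CHATAIGNE-LUMIERE", "type": "OMBRE-PIANO", "category": "chataigne"},
--
--     # ═══════════ CARAMELS ═══════════
--     "6": {"luxe": "Caramel Doré", "sku": "CARAMEL-DORE", "type": "SOLID", "category": "caramel"},
--     "BM": {"luxe": "Miel Sauvage", "sku": "MIEL-SAUVAGE", "type": "SOLID", "category": "caramel"},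
--     "6/24": {"luxe": "Golden Hour", "sku": "GOLDEN-HOUR", "type": "BALAYAGE", "category": "caramel"},
--     "6/6T24": {"luxe": "Caramel Soleil", "sku": "CARAMEL-SOLEIL", "type": "OMBRE-PIANO", "category": "caramel"},
--
--     # ═══════════ BLONDS ═══════════
--     "18/22": {"luxe": "Champagne Doré", "sku": "CHAMPAGNE-DORE", "type": "PIANO", "category": "blond"},
--     "60A": {"luxe": "Platine Pur", "sku": "PLATINE-PUR", "type": "SOLID", "category": "blond"},
--     "PHA": {"luxe": "Cendré Céleste", "sku": "CENDRE-CELESTE", "type": "SOLID", "category": "blond"},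
--     "613/18A": {"luxe": "Diamant Glacé", "sku": "DIAMANT-GLACE", "type": "BALAYAGE", "category": "blond"},
--
--     # ═══════════ BLANCS ═══════════
--     "IVORY": {"luxe": "Ivoire Précieux", "sku": "IVOIRE", "type": "SOLID", "category": "blanc"},
--     "ICW": {"luxe": "Cristal Polaire", "sku": "CRISTAL-POLAIRE", "type": "SOLID", "category": "blanc"},
--
--     # ═══════════ OMBRÉS ═══════════
--     "CB": {"luxe": "Miel Sauvage Ombré", "sku": "MIEL-OMBRE", "type": "OMBRE", "category": "ombre"},
--     "HPS": {"luxe": "Cendré Étoilé", "sku": "CENDRE-ETOILE", "type": "OMBRE", "category": "ombre"},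
--     "5AT60": {"luxe": "Aurore Glaciale", "sku": "AURORE-GLACIALE", "type": "OMBRE", "category": "ombre"},
--     "5ATP18B62": {"luxe": "Aurore Boréale", "sku": "AURORE-BOREALE", "type": "OMBRE", "category": "ombre"},
--     "2BTP18/1006": {"luxe": "Espresso Lumière", "sku": "ESPRESSO-LUMIERE", "type": "OMBRE-PIANO", "category": "ombre"},
--     "T14/P14/24": {"luxe": "Venise Dorée", "sku": "VENISE-DOREE", "type": "OMBRE-PIANO", "category": "ombre"},
-- }
--
-- def get_color_info(color_code: str) -> Dict[str, str]:
--     """Obtenir les informations de couleur depuis le code"""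
--     if not color_code:
--         return {"luxe": "Inconnu", "sku": "UNKNOWN", "type": "SOLID", "category": "autre"}
--
--     clean = color_code.strip().upper()
--
--     # Recherche exacte
--     if clean in COLOR_LUXURA_MAP:
--         return COLOR_LUXURA_MAP[clean]
--
--     # Recherche avec variantes de formatage
--     for code, info in COLOR_LUXURA_MAP.items():
--         if code.replace("/", "-") == clean.replace("/", "-"):
--             return info
--         if code.replace("/", "") == clean.replace("/", ""):
--             return info
--
--     # Fallback intelligent
--     return {"luxe": f"Teinte {color_code}", "sku": clean.replace("/", "-"), "type": "SOLID", "category": "autre"}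
-- ===== SOURCE B (Python) =====
-- from typing import Dict
--
-- # Palette kept as compact pipe-delimited lines; lookup indexes are built once
-- # at module load, so each call does dict probes only.
-- COLOR_TABLE = [
--     "1|Onyx Noir|ONYX-NOIR|SOLID|noir",
--     "1B|Noir Soie|NOIR-SOIE|SOLID|noir",
--     "2|Espresso Intense|ESPRESSO|SOLID|brun",
--     "DB|Nuit Mystère|NUIT-MYSTERE|SOLID|brun",
--     "DC|Chocolat Profond|CHOCOLAT-PROFOND|SOLID|brun",
--     "CACAO|Cacao Velours|CACAO-VELOURS|SOLID|brun",
--     "CHENGTU|Soie d'Orient|SOIE-ORIENT|SOLID|brun",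
--     "FOOCHOW|Cachemire Oriental|CACHEMIRE-ORIENTAL|SOLID|brun",
--     "3|Châtaigne Naturelle|CHATAIGNE|SOLID|chataigne",
--     "CINNAMON|Cannelle Épicée|CANNELLE|SOLID|chataigne",
--     "3/3T24|Châtaigne Lumière|CHATAIGNE-LUMIERE|OMBRE-PIANO|chataigne",
--     "6|Caramel Doré|CARAMEL-DORE|SOLID|caramel",
--     "BM|Miel Sauvage|MIEL-SAUVAGE|SOLID|caramel",
--     "6/24|Golden Hour|GOLDEN-HOUR|BALAYAGE|caramel",
--     "6/6T24|Caramel Soleil|CARAMEL-SOLEIL|OMBRE-PIANO|caramel",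
--     "18/22|Champagne Doré|CHAMPAGNE-DORE|PIANO|blond",
--     "60A|Platine Pur|PLATINE-PUR|SOLID|blond",
--     "PHA|Cendré Céleste|CENDRE-CELESTE|SOLID|blond",
--     "613/18A|Diamant Glacé|DIAMANT-GLACE|BALAYAGE|blond",
--     "IVORY|Ivoire Précieux|IVOIRE|SOLID|blanc",
--     "ICW|Cristal Polaire|CRISTAL-POLAIRE|SOLID|blanc",
--     "CB|Miel Sauvage Ombré|MIEL-OMBRE|OMBRE|ombre",
--     "HPS|Cendré Étoilé|CENDRE-ETOILE|OMBRE|ombre",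
--     "5AT60|Aurore Glaciale|AURORE-GLACIALE|OMBRE|ombre",
--     "5ATP18B62|Aurore Boréale|AURORE-BOREALE|OMBRE|ombre",
--     "2BTP18/1006|Espresso Lumière|ESPRESSO-LUMIERE|OMBRE-PIANO|ombre",
--     "T14/P14/24|Venise Dorée|VENISE-DOREE|OMBRE-PIANO|ombre",
-- ]
--
--
-- def _mk(luxe: str, sku: str, typ: str, cat: str) -> Dict[str, str]:
--     return {"luxe": luxe, "sku": sku, "type": typ, "category": cat}
--
--
-- _EXACT: Dict[str, Dict[str, str]] = {}
-- _DASH: Dict[str, tuple] = {}   # dash-normalized code -> (position, info), first entry wins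
-- _STRIP: Dict[str, tuple] = {}  # slash-stripped code  -> (position, info), first entry wins
-- for _i, _line in enumerate(COLOR_TABLE):
--     _f = _line.split("|")
--     _info = _mk(_f[1], _f[2], _f[3], _f[4])
--     _EXACT[_f[0]] = _info
--     _DASH.setdefault(_f[0].replace("/", "-"), (_i, _info))
--     _STRIP.setdefault(_f[0].replace("/", ""), (_i, _info))
--
--
-- def get_color_info(color_code: str) -> Dict[str, str]:
--     """Obtenir les informations de couleur depuis le code"""
--     if not color_code:
--         return _mk("Inconnu", "UNKNOWN", "SOLID", "autre")
--     clean = color_code.strip().upper()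
--     exact = _EXACT.get(clean)
--     if exact is not None:
--         return exact
--     d = _DASH.get(clean.replace("/", "-"))
--     s = _STRIP.get(clean.replace("/", ""))
--     if d is not None and (s is None or d[0] <= s[0]):
--         return d[1]
--     if s is not None:
--         return s[1]
--     return _mk("Teinte " + color_code, clean.replace("/", "-"), "SOLID", "autre")
-- ===== Notes on version B (the rewrite author's own statement) =====
-- stated objective: faster
-- what changed: B stores the palette as compact pipe-delimited lines and builds, once at module load, an exact-code dict plus two first-wins variant indexes (dash-normalized and slash-stripped code forms with original positions), so each call replaces A's linear scan over COLOR_LUXURA_MAP with constant-count dict probes combined by earliest position.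
import Mathlib
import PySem

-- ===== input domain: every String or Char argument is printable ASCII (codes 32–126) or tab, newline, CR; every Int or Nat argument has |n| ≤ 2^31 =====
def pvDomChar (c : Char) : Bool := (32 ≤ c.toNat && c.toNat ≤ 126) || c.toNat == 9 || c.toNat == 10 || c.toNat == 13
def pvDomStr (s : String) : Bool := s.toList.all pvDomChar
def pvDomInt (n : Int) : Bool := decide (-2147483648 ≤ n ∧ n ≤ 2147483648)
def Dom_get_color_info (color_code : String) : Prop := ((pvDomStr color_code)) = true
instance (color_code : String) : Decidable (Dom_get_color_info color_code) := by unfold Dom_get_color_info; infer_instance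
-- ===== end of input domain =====

-- B stores the palette as compact pipe-delimited lines and builds, once at module load, an
-- exact-code dict plus two position-carrying first-wins variant indexes, replacing A's
-- per-call scan over COLOR_LUXURA_MAP with dict probes; same return value on every input.

-- ===== PORT A =====
-- A's module constant COLOR_LUXURA_MAP (an insertion-ordered dict)
def colorPairs : List (String × List (String × String)) := [
  ("1", [("luxe", "Onyx Noir"), ("sku", "ONYX-NOIR"), ("type", "SOLID"), ("category", "noir")]),
  ("1B", [("luxe", "Noir Soie"), ("sku", "NOIR-SOIE"), ("type", "SOLID"), ("category", "noir")]),
  ("2", [("luxe", "Espresso Intense"), ("sku", "ESPRESSO"), ("type", "SOLID"), ("category", "brun")]),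
  ("DB", [("luxe", "Nuit Mystère"), ("sku", "NUIT-MYSTERE"), ("type", "SOLID"), ("category", "brun")]),
  ("DC", [("luxe", "Chocolat Profond"), ("sku", "CHOCOLAT-PROFOND"), ("type", "SOLID"), ("category", "brun")]),
  ("CACAO", [("luxe", "Cacao Velours"), ("sku", "CACAO-VELOURS"), ("type", "SOLID"), ("category", "brun")]),
  ("CHENGTU", [("luxe", "Soie d'Orient"), ("sku", "SOIE-ORIENT"), ("type", "SOLID"), ("category", "brun")]),
  ("FOOCHOW", [("luxe", "Cachemire Oriental"), ("sku", "CACHEMIRE-ORIENTAL"), ("type", "SOLID"), ("category", "brun")]),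
  ("3", [("luxe", "Châtaigne Naturelle"), ("sku", "CHATAIGNE"), ("type", "SOLID"), ("category", "chataigne")]),
  ("CINNAMON", [("luxe", "Cannelle Épicée"), ("sku", "CANNELLE"), ("type", "SOLID"), ("category", "chataigne")]),
  ("3/3T24", [("luxe", "Châtaigne Lumière"), ("sku", "CHATAIGNE-LUMIERE"), ("type", "OMBRE-PIANO"), ("category", "chataigne")]),
  ("6", [("luxe", "Caramel Doré"), ("sku", "CARAMEL-DORE"), ("type", "SOLID"), ("category", "caramel")]),
  ("BM", [("luxe", "Miel Sauvage"), ("sku", "MIEL-SAUVAGE"), ("type", "SOLID"), ("category", "caramel")]),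
  ("6/24", [("luxe", "Golden Hour"), ("sku", "GOLDEN-HOUR"), ("type", "BALAYAGE"), ("category", "caramel")]),
  ("6/6T24", [("luxe", "Caramel Soleil"), ("sku", "CARAMEL-SOLEIL"), ("type", "OMBRE-PIANO"), ("category", "caramel")]),
  ("18/22", [("luxe", "Champagne Doré"), ("sku", "CHAMPAGNE-DORE"), ("type", "PIANO"), ("category", "blond")]),
  ("60A", [("luxe", "Platine Pur"), ("sku", "PLATINE-PUR"), ("type", "SOLID"), ("category", "blond")]),
  ("PHA", [("luxe", "Cendré Céleste"), ("sku", "CENDRE-CELESTE"), ("type", "SOLID"), ("category", "blond")]),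
  ("613/18A", [("luxe", "Diamant Glacé"), ("sku", "DIAMANT-GLACE"), ("type", "BALAYAGE"), ("category", "blond")]),
  ("IVORY", [("luxe", "Ivoire Précieux"), ("sku", "IVOIRE"), ("type", "SOLID"), ("category", "blanc")]),
  ("ICW", [("luxe", "Cristal Polaire"), ("sku", "CRISTAL-POLAIRE"), ("type", "SOLID"), ("category", "blanc")]),
  ("CB", [("luxe", "Miel Sauvage Ombré"), ("sku", "MIEL-OMBRE"), ("type", "OMBRE"), ("category", "ombre")]),
  ("HPS", [("luxe", "Cendré Étoilé"), ("sku", "CENDRE-ETOILE"), ("type", "OMBRE"), ("category", "ombre")]),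
  ("5AT60", [("luxe", "Aurore Glaciale"), ("sku", "AURORE-GLACIALE"), ("type", "OMBRE"), ("category", "ombre")]),
  ("5ATP18B62", [("luxe", "Aurore Boréale"), ("sku", "AURORE-BOREALE"), ("type", "OMBRE"), ("category", "ombre")]),
  ("2BTP18/1006", [("luxe", "Espresso Lumière"), ("sku", "ESPRESSO-LUMIERE"), ("type", "OMBRE-PIANO"), ("category", "ombre")]),
  ("T14/P14/24", [("luxe", "Venise Dorée"), ("sku", "VENISE-DOREE"), ("type", "OMBRE-PIANO"), ("category", "ombre")])
]

def colorDict : PySem.Dict String (List (String × String)) := PySem.Dict.mk colorPairs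

-- A's for-loop over COLOR_LUXURA_MAP.items(): first code matching by dash-form, then strip-form
def findVariant (clean : String) : List (String × List (String × String)) → Option (List (String × String))
  | [] => none
  | (code, info) :: rest =>
      if PySem.Str.replace code "/" "-" == PySem.Str.replace clean "/" "-" then some info
      else if PySem.Str.replace code "/" "" == PySem.Str.replace clean "/" "" then some info
      else findVariant clean rest

def get_color_info (color_code : String) : List (String × String) :=
  if color_code = "" then
    [("luxe", "Inconnu"), ("sku", "UNKNOWN"), ("type", "SOLID"), ("category", "autre")]
  else
    let clean := PySem.Str.upper (PySem.Str.strip color_code)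
    match colorDict.get? clean with
    | some info => info
    | none =>
      match findVariant clean colorPairs with
      | some info => info
      | none =>
        [("luxe", "Teinte " ++ color_code), ("sku", PySem.Str.replace clean "/" "-"),
         ("type", "SOLID"), ("category", "autre")]

-- ===== PORT B =====
-- Source B's palette: compact pipe-delimited lines, parsed at module load
def colorLines : List String := [
  "1|Onyx Noir|ONYX-NOIR|SOLID|noir",
  "1B|Noir Soie|NOIR-SOIE|SOLID|noir",
  "2|Espresso Intense|ESPRESSO|SOLID|brun",
  "DB|Nuit Mystère|NUIT-MYSTERE|SOLID|brun",
  "DC|Chocolat Profond|CHOCOLAT-PROFOND|SOLID|brun",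
  "CACAO|Cacao Velours|CACAO-VELOURS|SOLID|brun",
  "CHENGTU|Soie d'Orient|SOIE-ORIENT|SOLID|brun",
  "FOOCHOW|Cachemire Oriental|CACHEMIRE-ORIENTAL|SOLID|brun",
  "3|Châtaigne Naturelle|CHATAIGNE|SOLID|chataigne",
  "CINNAMON|Cannelle Épicée|CANNELLE|SOLID|chataigne",
  "3/3T24|Châtaigne Lumière|CHATAIGNE-LUMIERE|OMBRE-PIANO|chataigne",
  "6|Caramel Doré|CARAMEL-DORE|SOLID|caramel",
  "BM|Miel Sauvage|MIEL-SAUVAGE|SOLID|caramel",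
  "6/24|Golden Hour|GOLDEN-HOUR|BALAYAGE|caramel",
  "6/6T24|Caramel Soleil|CARAMEL-SOLEIL|OMBRE-PIANO|caramel",
  "18/22|Champagne Doré|CHAMPAGNE-DORE|PIANO|blond",
  "60A|Platine Pur|PLATINE-PUR|SOLID|blond",
  "PHA|Cendré Céleste|CENDRE-CELESTE|SOLID|blond",
  "613/18A|Diamant Glacé|DIAMANT-GLACE|BALAYAGE|blond",
  "IVORY|Ivoire Précieux|IVOIRE|SOLID|blanc",
  "ICW|Cristal Polaire|CRISTAL-POLAIRE|SOLID|blanc",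
  "CB|Miel Sauvage Ombré|MIEL-OMBRE|OMBRE|ombre",
  "HPS|Cendré Étoilé|CENDRE-ETOILE|OMBRE|ombre",
  "5AT60|Aurore Glaciale|AURORE-GLACIALE|OMBRE|ombre",
  "5ATP18B62|Aurore Boréale|AURORE-BOREALE|OMBRE|ombre",
  "2BTP18/1006|Espresso Lumière|ESPRESSO-LUMIERE|OMBRE-PIANO|ombre",
  "T14/P14/24|Venise Dorée|VENISE-DOREE|OMBRE-PIANO|ombre"
]

-- Source B's _mk helper
def mkInfo (luxe sku typ cat : String) : List (String × String) :=
  [("luxe", luxe), ("sku", sku), ("type", typ), ("category", cat)]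

-- the parsed rows: each line split on "|"
-- line.split("|"): sep is the nonempty literal "|", so split? always returns some (exact)
def parsedRows : List (List String) :=
  colorLines.map (fun line => (PySem.Str.split? line "|").getD [])

-- Source B's module-load loop over enumerate(...): fills the exact-code table and the two
-- first-wins variant indexes (setdefault keeps the earliest line). Field access _f[k]
-- is ported with pyGetD: exact here, since every line of the constant table has 5
-- fields, so the Python indexing never raises.
def buildTables :
    PySem.Dict String (List (String × String)) ×
    PySem.Dict String (Int × List (String × String)) ×
    PySem.Dict String (Int × List (String × String)) :=
  (PySem.List.enumerate parsedRows 0).foldl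
    (fun tbls r =>
      let f := r.2
      let info := mkInfo (PySem.List.pyGetD f 1 "") (PySem.List.pyGetD f 2 "")
                    (PySem.List.pyGetD f 3 "") (PySem.List.pyGetD f 4 "")
      (tbls.1.insert (PySem.List.pyGetD f 0 "") info,
       tbls.2.1.setdefault (PySem.Str.replace (PySem.List.pyGetD f 0 "") "/" "-") (r.1, info),
       tbls.2.2.setdefault (PySem.Str.replace (PySem.List.pyGetD f 0 "") "/" "") (r.1, info)))
    (PySem.Dict.empty, PySem.Dict.empty, PySem.Dict.empty)

def exactTable : PySem.Dict String (List (String × String)) := buildTables.1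
def dashTable : PySem.Dict String (Int × List (String × String)) := buildTables.2.1
def stripTable : PySem.Dict String (Int × List (String × String)) := buildTables.2.2

def get_color_info_alt (color_code : String) : List (String × String) :=
  if color_code = "" then
    mkInfo "Inconnu" "UNKNOWN" "SOLID" "autre"
  else
    let clean := PySem.Str.upper (PySem.Str.strip color_code)
    match exactTable.get? clean with
    | some exact => exact
    | none =>
      let d := dashTable.get? (PySem.Str.replace clean "/" "-")
      let s := stripTable.get? (PySem.Str.replace clean "/" "")
      match d with
      | some dp =>
        match s with
        | some sp => if dp.1 ≤ sp.1 then dp.2 else sp.2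
        | none => dp.2
      | none =>
        match s with
        | some sp => sp.2
        | none => mkInfo ("Teinte " ++ color_code) (PySem.Str.replace clean "/" "-") "SOLID" "autre"

-- ===== PRECONDITION & SPEC =====
def Spec_get_color_info (color_code : String) (out : List (String × String)) : Prop := out = get_color_info_alt color_code
instance (color_code : String) (out : List (String × String)) : Decidable (Spec_get_color_info color_code out) := by unfold Spec_get_color_info; infer_instance

-- ===== CLAIM =====
def Claim_equal_get_color_info : Prop := ∀ (color_code : String), Dom_get_color_info color_code → Spec_get_color_info color_code (get_color_info color_code)

-- ===== LEMMAS AND PROOFS =====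

/-- first element of `L` (positions starting at `n`) whose `key` equals `k`, paired with its `val`. -/
def firstHitBy {α : Type} (key : α → String) (val : α → List (String × String)) (k : String) (n : Int) :
    List α → Option (Int × List (String × String))
  | [] => none
  | x :: rest => if key x == k then some (n, val x) else firstHitBy key val k (n + 1) rest

theorem firstHitBy_ge {α : Type} {key : α → String} {val : α → List (String × String)}
    {k : String} {n m : Int} {L : List α} {i : List (String × String)}
    (h : firstHitBy key val k n L = some (m, i)) : n ≤ m := by
  induction L generalizing n with
  | nil => simp [firstHitBy] at h
  | cons x rest ih =>
    simp only [firstHitBy] at h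
    split at h
    · simp_all
    · have := ih h; omega

theorem firstHitBy_map {α β : Type} (m : α → β) (key : β → String)
    (val : β → List (String × String)) (k : String) (n : Int) (L : List α) :
    firstHitBy key val k n (L.map m) = firstHitBy (fun x => key (m x)) (fun x => val (m x)) k n L := by
  induction L generalizing n with
  | nil => rfl
  | cons x rest ih => simp only [List.map, firstHitBy]; split <;> simp_all

theorem foldl_triple_split (L : List (Int × List String))
    (d0 : PySem.Dict String (List (String × String)))
    (d1 d2 : PySem.Dict String (Int × List (String × String))) :
    L.foldl
      (fun tbls r =>
        let f := r.2
        let info := mkInfo (PySem.List.pyGetD f 1 "") (PySem.List.pyGetD f 2 "")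
                      (PySem.List.pyGetD f 3 "") (PySem.List.pyGetD f 4 "")
        (tbls.1.insert (PySem.List.pyGetD f 0 "") info,
         tbls.2.1.setdefault (PySem.Str.replace (PySem.List.pyGetD f 0 "") "/" "-") (r.1, info),
         tbls.2.2.setdefault (PySem.Str.replace (PySem.List.pyGetD f 0 "") "/" "") (r.1, info)))
      (d0, d1, d2)
    = (L.foldl (fun d r => d.insert (PySem.List.pyGetD r.2 0 "")
                  (mkInfo (PySem.List.pyGetD r.2 1 "") (PySem.List.pyGetD r.2 2 "")
                    (PySem.List.pyGetD r.2 3 "") (PySem.List.pyGetD r.2 4 ""))) d0,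
       L.foldl (fun d r => d.setdefault (PySem.Str.replace (PySem.List.pyGetD r.2 0 "") "/" "-")
                  (r.1, mkInfo (PySem.List.pyGetD r.2 1 "") (PySem.List.pyGetD r.2 2 "")
                    (PySem.List.pyGetD r.2 3 "") (PySem.List.pyGetD r.2 4 ""))) d1,
       L.foldl (fun d r => d.setdefault (PySem.Str.replace (PySem.List.pyGetD r.2 0 "") "/" "")
                  (r.1, mkInfo (PySem.List.pyGetD r.2 1 "") (PySem.List.pyGetD r.2 2 "")
                    (PySem.List.pyGetD r.2 3 "") (PySem.List.pyGetD r.2 4 ""))) d2) := by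
  induction L generalizing d0 d1 d2 with
  | nil => rfl
  | cons x rest ih => simp [List.foldl, ih]

/-- get? of a setdefault-fold over enumerated elements: the initial dict wins, otherwise the first hit. -/
theorem get?_setdefault_foldl {α : Type} (key : α → String) (val : α → List (String × String))
    (L : List α) (n : Int) (d : PySem.Dict String (Int × List (String × String))) (k : String) :
    ((PySem.List.enumerate L n).foldl
        (fun d pe => d.setdefault (key pe.2) (pe.1, val pe.2)) d).get? k
      = (d.get? k).or (firstHitBy key val k n L) := by
  induction L generalizing n d with
  | nil => simp [PySem.List.enumerate_nil, firstHitBy]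
  | cons x rest ih =>
    simp only [PySem.List.enumerate_cons, List.foldl, firstHitBy]
    rw [ih]
    by_cases hk : key x = k
    · subst hk
      rw [PySem.Dict.get?_setdefault_self d (key x) (n, val x)]
      simp only [beq_self_eq_true, if_pos]
      cases d.get? (key x) <;> simp [Option.or]
    · rw [PySem.Dict.get?_setdefault_of_ne _ _ (Ne.symm hk)]
      simp [hk]

/-- the combined two-probe selection equals A's first-match scan. -/
theorem combine_eq_findVariant (clean : String)
    (L : List (String × List (String × String))) (n : Int) :
    (match firstHitBy (fun p => PySem.Str.replace p.1 "/" "-") (fun p => p.2)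
             (PySem.Str.replace clean "/" "-") n L,
           firstHitBy (fun p => PySem.Str.replace p.1 "/" "") (fun p => p.2)
             (PySem.Str.replace clean "/" "") n L with
     | some dp, some sp => some (if dp.1 ≤ sp.1 then dp.2 else sp.2)
     | some dp, none => some dp.2
     | none, some sp => some sp.2
     | none, none => none)
    = findVariant clean L := by
  induction L generalizing n with
  | nil => simp [firstHitBy, findVariant]
  | cons x rest ih =>
    obtain ⟨code, info⟩ := x
    simp only [firstHitBy, findVariant]
    by_cases h1 : PySem.Str.replace code "/" "-" == PySem.Str.replace clean "/" "-"
    · simp only [h1, if_pos]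
      by_cases h2 : PySem.Str.replace code "/" "" = PySem.Str.replace clean "/" ""
      · simp [h2]
      · simp only [h2, beq_iff_eq, ite_false]
        cases hs : firstHitBy (fun p => PySem.Str.replace p.1 "/" "") (fun p => p.2)
            (PySem.Str.replace clean "/" "") (n + 1) rest with
        | none => simp
        | some qj =>
          obtain ⟨q, j⟩ := qj
          have hq : n + 1 ≤ q := firstHitBy_ge hs
          have hnq : n ≤ q := by omega
          simp [hnq]
    · simp only [h1, Bool.false_eq_true, ite_false]
      by_cases h2 : PySem.Str.replace code "/" "" == PySem.Str.replace clean "/" ""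
      · simp only [h2, if_pos]
        cases hd : firstHitBy (fun p => PySem.Str.replace p.1 "/" "-") (fun p => p.2)
            (PySem.Str.replace clean "/" "-") (n + 1) rest with
        | none => simp
        | some pi =>
          obtain ⟨p, i⟩ := pi
          have hp : n + 1 ≤ p := firstHitBy_ge hd
          have : ¬ (p ≤ n) := by omega
          simp [this]
      · simp only [h2, Bool.false_eq_true, ite_false]
        exact ih (n + 1)

def pairOfFields (f : List String) : String × List (String × String) :=
  (PySem.List.pyGetD f 0 "",
   mkInfo (PySem.List.pyGetD f 1 "") (PySem.List.pyGetD f 2 "")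
     (PySem.List.pyGetD f 3 "") (PySem.List.pyGetD f 4 ""))

set_option maxHeartbeats 1000000 in
set_option maxRecDepth 40000 in
theorem colorPairs_eq_map : colorPairs = parsedRows.map pairOfFields := by decide

set_option maxHeartbeats 1000000 in
set_option maxRecDepth 40000 in
theorem exactTable_get? (k : String) : exactTable.get? k = colorDict.get? k := by
  have h : exactTable = colorDict := by rfl
  rw [h]

theorem dashTable_get? (k : String) :
    dashTable.get? k
      = firstHitBy (fun p => PySem.Str.replace p.1 "/" "-") (fun p => p.2) k 0 colorPairs := by
  have hsplit : dashTable
      = (PySem.List.enumerate parsedRows 0).foldl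
          (fun d r => d.setdefault (PySem.Str.replace (PySem.List.pyGetD r.2 0 "") "/" "-")
             (r.1, mkInfo (PySem.List.pyGetD r.2 1 "") (PySem.List.pyGetD r.2 2 "")
               (PySem.List.pyGetD r.2 3 "") (PySem.List.pyGetD r.2 4 ""))) PySem.Dict.empty := by
    show (buildTables).2.1 = _
    unfold buildTables
    rw [foldl_triple_split]
  rw [hsplit]
  have hfold := get?_setdefault_foldl (fun f => PySem.Str.replace (PySem.List.pyGetD f 0 "") "/" "-")
        (fun f => mkInfo (PySem.List.pyGetD f 1 "") (PySem.List.pyGetD f 2 "")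
          (PySem.List.pyGetD f 3 "") (PySem.List.pyGetD f 4 "")) parsedRows 0 PySem.Dict.empty k
  simp only [] at hfold
  rw [hfold]
  rw [colorPairs_eq_map, firstHitBy_map]
  simp [PySem.Dict.get?, PySem.Dict.empty, pairOfFields]

theorem stripTable_get? (k : String) :
    stripTable.get? k
      = firstHitBy (fun p => PySem.Str.replace p.1 "/" "") (fun p => p.2) k 0 colorPairs := by
  have hsplit : stripTable
      = (PySem.List.enumerate parsedRows 0).foldl
          (fun d r => d.setdefault (PySem.Str.replace (PySem.List.pyGetD r.2 0 "") "/" "")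
             (r.1, mkInfo (PySem.List.pyGetD r.2 1 "") (PySem.List.pyGetD r.2 2 "")
               (PySem.List.pyGetD r.2 3 "") (PySem.List.pyGetD r.2 4 ""))) PySem.Dict.empty := by
    show (buildTables).2.2 = _
    unfold buildTables
    rw [foldl_triple_split]
  rw [hsplit]
  have hfold := get?_setdefault_foldl (fun f => PySem.Str.replace (PySem.List.pyGetD f 0 "") "/" "")
        (fun f => mkInfo (PySem.List.pyGetD f 1 "") (PySem.List.pyGetD f 2 "")
          (PySem.List.pyGetD f 3 "") (PySem.List.pyGetD f 4 "")) parsedRows 0 PySem.Dict.empty k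
  simp only [] at hfold
  rw [hfold]
  rw [colorPairs_eq_map, firstHitBy_map]
  simp [PySem.Dict.get?, PySem.Dict.empty, pairOfFields]

-- ===== VERDICT =====
theorem get_color_info_spec : Claim_equal_get_color_info := by
  intro color_code _
  unfold Spec_get_color_info get_color_info get_color_info_alt
  by_cases he : color_code = ""
  · rw [if_pos he, if_pos he]; rfl
  · rw [if_neg he, if_neg he]
    simp only [exactTable_get?, dashTable_get?, stripTable_get?]
    cases hx : colorDict.get? (PySem.Str.upper (PySem.Str.strip color_code)) with
    | some info => rfl
    | none =>
      have := combine_eq_findVariant (PySem.Str.upper (PySem.Str.strip color_code)) colorPairs 0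
      cases hv : findVariant (PySem.Str.upper (PySem.Str.strip color_code)) colorPairs with
      | none =>
        rw [hv] at this
        cases hd : firstHitBy (fun p => PySem.Str.replace p.1 "/" "-") (fun p => p.2)
            (PySem.Str.replace (PySem.Str.upper (PySem.Str.strip color_code)) "/" "-") 0 colorPairs with
        | none =>
          cases hs : firstHitBy (fun p => PySem.Str.replace p.1 "/" "") (fun p => p.2)
              (PySem.Str.replace (PySem.Str.upper (PySem.Str.strip color_code)) "/" "") 0 colorPairs with
          | none => rfl
          | some qj => rw [hd, hs] at this; obtain ⟨q, j⟩ := qj; simp at this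
        | some pi =>
          obtain ⟨p, i⟩ := pi
          rw [hd] at this
          cases hs : firstHitBy (fun p => PySem.Str.replace p.1 "/" "") (fun p => p.2)
              (PySem.Str.replace (PySem.Str.upper (PySem.Str.strip color_code)) "/" "") 0 colorPairs with
          | none => rw [hs] at this; simp at this
          | some qj => obtain ⟨q, j⟩ := qj; rw [hs] at this; simp at this
      | some info =>
        rw [hv] at this
        cases hd : firstHitBy (fun p => PySem.Str.replace p.1 "/" "-") (fun p => p.2)
            (PySem.Str.replace (PySem.Str.upper (PySem.Str.strip color_code)) "/" "-") 0 colorPairs with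
        | none =>
          cases hs : firstHitBy (fun p => PySem.Str.replace p.1 "/" "") (fun p => p.2)
              (PySem.Str.replace (PySem.Str.upper (PySem.Str.strip color_code)) "/" "") 0 colorPairs with
          | none => rw [hd, hs] at this; simp at this
          | some qj => obtain ⟨q, j⟩ := qj; rw [hd, hs] at this; simpa using this.symm
        | some pi =>
          obtain ⟨p, i⟩ := pi
          cases hs : firstHitBy (fun p => PySem.Str.replace p.1 "/" "") (fun p => p.2)
              (PySem.Str.replace (PySem.Str.upper (PySem.Str.strip color_code)) "/" "") 0 colorPairs with
          | none => rw [hd, hs] at this; simpa using this.symm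
          | some qj => obtain ⟨q, j⟩ := qj; rw [hd, hs] at this; simpa using this.symm
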